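-- pv_equiv track=rewrite | github.com/Muril0Reis/SimuladorDeLoteria | validacao.py | validar_entrada
-- ===== SOURCE A (Python) =====
-- def validar_entrada(tipo, numeros_usuario):
--     if tipo == 1 and len(numeros_usuario) != 6:
--         return False
--     elif tipo == 2 and len(numeros_usuario) != 5:
--         return False
--     elif tipo == 3 and len(numeros_usuario) != 15:
--         return False
--
--     if tipo == 1 and not all(1 <= n <= 60 for n in numeros_usuario):
--         return False
--     elif tipo == 2 and not all(1 <= n <= 80 for n in numeros_usuario):
--         return False
--     elif tipo == 3 and not all(1 <= n <= 25 for n in numeros_usuario):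
--         return False
--
--     return True
-- ===== SOURCE B (Python) =====
-- def validar_entrada(tipo, numeros_usuario):
--     if tipo == 1:
--         hi, need = 60, 6
--     elif tipo == 2:
--         hi, need = 80, 5
--     elif tipo == 3:
--         hi, need = 25, 15
--     else:
--         return True
--
--     def ok(rest, remaining):
--         # single recursive pass: range-check each element while counting down
--         if not rest:
--             return remaining == 0
--         return 1 <= rest[0] <= hi and remaining > 0 and ok(rest[1:], remaining - 1)
--
--     return ok(numeros_usuario, need)
-- ===== Notes on version B (the rewrite author's own statement) =====
-- stated objective: alternative
-- what changed: Replaces A's two staged if/elif chains (a len() comparison pass then a separate all() range pass) with one recursive single pass that range-checks each element while counting down a remaining-slots fuel, stopping early and never calling len() or all().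
import Mathlib
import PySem

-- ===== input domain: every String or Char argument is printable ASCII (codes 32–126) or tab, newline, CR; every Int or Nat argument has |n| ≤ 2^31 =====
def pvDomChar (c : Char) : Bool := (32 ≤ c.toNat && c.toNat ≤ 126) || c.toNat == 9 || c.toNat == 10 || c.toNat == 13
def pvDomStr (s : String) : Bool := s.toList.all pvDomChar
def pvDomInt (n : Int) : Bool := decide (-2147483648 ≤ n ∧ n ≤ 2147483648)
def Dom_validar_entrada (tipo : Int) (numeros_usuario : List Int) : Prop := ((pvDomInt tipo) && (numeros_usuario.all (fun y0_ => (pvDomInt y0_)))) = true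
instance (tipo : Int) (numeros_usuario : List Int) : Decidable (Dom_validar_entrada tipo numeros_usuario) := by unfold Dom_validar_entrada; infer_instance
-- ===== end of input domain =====

-- B replaces A's staged len()+all() checks by one recursive pass that range-checks elements while counting down a remaining-slots fuel; objective: alternative (same cost, different algorithm shape).


-- ===== PORT A =====
def validar_entrada (tipo : Int) (numeros_usuario : List Int) : Bool :=
  if tipo == 1 && numeros_usuario.length != 6 then false
  else if tipo == 2 && numeros_usuario.length != 5 then false
  else if tipo == 3 && numeros_usuario.length != 15 then false
  else if tipo == 1 && !(numeros_usuario.all (fun n => 1 ≤ n && n ≤ 60)) then false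
  else if tipo == 2 && !(numeros_usuario.all (fun n => 1 ≤ n && n ≤ 80)) then false
  else if tipo == 3 && !(numeros_usuario.all (fun n => 1 ≤ n && n ≤ 25)) then false
  else true

-- ===== PORT B =====
-- B's inner recursive helper 'ok': one pass, range check + fuel countdown
def okFuel (hi : Int) : List Int → Int → Bool
  | [], remaining => remaining == 0
  | n :: rest, remaining => (1 ≤ n && n ≤ hi) && remaining > 0 && okFuel hi rest (remaining - 1)

def validar_entrada_alt (tipo : Int) (numeros_usuario : List Int) : Bool :=
  if tipo == 1 then okFuel 60 numeros_usuario 6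
  else if tipo == 2 then okFuel 80 numeros_usuario 5
  else if tipo == 3 then okFuel 25 numeros_usuario 15
  else true

-- ===== PRECONDITION & SPEC =====
def Spec_validar_entrada (tipo : Int) (numeros_usuario : List Int) (out : Bool) : Prop := out = validar_entrada_alt tipo numeros_usuario
instance (tipo : Int) (numeros_usuario : List Int) (out : Bool) : Decidable (Spec_validar_entrada tipo numeros_usuario out) := by unfold Spec_validar_entrada; infer_instance

-- ===== CLAIM (what is proved, stated in full; the proofs are below) =====
def Claim_equal_validar_entrada : Prop := ∀ (tipo : Int) (numeros_usuario : List Int), Dom_validar_entrada tipo numeros_usuario → Spec_validar_entrada tipo numeros_usuario (validar_entrada tipo numeros_usuario)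

-- ===== LEMMAS AND PROOFS =====
theorem okFuel_eq (hi : Int) (xs : List Int) (k : Int) :
    okFuel hi xs k = (((xs.length : Int) == k) && xs.all (fun n => 1 ≤ n && n ≤ hi)) := by
  induction xs generalizing k with
  | nil => rw [Bool.eq_iff_iff]; simp [okFuel]; omega
  | cons n rest ih =>
      rw [Bool.eq_iff_iff]
      simp [okFuel, ih, List.all_cons]
      have hn : (0:Int) ≤ rest.length := by positivity
      constructor
      · rintro ⟨⟨⟨h1, h2⟩, hk⟩, hlen, hall⟩
        exact ⟨by omega, ⟨h1, h2⟩, hall⟩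
      · rintro ⟨hlen, ⟨h1, h2⟩, hall⟩
        exact ⟨⟨⟨h1, h2⟩, by omega⟩, by omega, hall⟩

theorem validar_entrada_eq_alt (tipo : Int) (numeros_usuario : List Int) :
    validar_entrada tipo numeros_usuario = validar_entrada_alt tipo numeros_usuario := by
  by_cases h1 : tipo = 1
  · subst h1
    rw [Bool.eq_iff_iff]
    simp [validar_entrada, validar_entrada_alt, okFuel_eq]
    omega
  · by_cases h2 : tipo = 2
    · subst h2
      rw [Bool.eq_iff_iff]
      simp [validar_entrada, validar_entrada_alt, okFuel_eq]
      omega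
    · by_cases h3 : tipo = 3
      · subst h3
        rw [Bool.eq_iff_iff]
        simp [validar_entrada, validar_entrada_alt, okFuel_eq]
        omega
      · simp [validar_entrada, validar_entrada_alt, h1, h2, h3]

-- ===== VERDICT (by name: the statement is the Claim_ definition above) =====
theorem validar_entrada_spec : Claim_equal_validar_entrada := by
  intro tipo nums _
  exact validar_entrada_eq_alt tipo nums
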